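-- pv_equiv track=rewrite | github.com/jbirby/POCSAG-Pager-Codec | scripts/pocsag_common.py | decode_numeric_message
-- ===== SOURCE A (Python) =====
-- def decode_numeric_message(data_chunks):
--     """
--     Decode numeric message from 20-bit chunks.
--
--     Args:
--         data_chunks: List of 20-bit values
--
--     Returns:
--         Decoded string
--     """
--     # Reverse map
--     value_map = {
--         0x0: '0', 0x1: '1', 0x2: '2', 0x3: '3', 0x4: '4',
--         0x5: '5', 0x6: '6', 0x7: '7', 0x8: '8', 0x9: '9',
--         0xA: ' ', 0xB: 'U', 0xC: '-', 0xD: '[', 0xE: ']',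
--         0xF: ''  # unused
--     }
--
--     result = []
--     for chunk in data_chunks:
--         # Extract 5 nibbles (4 bits each)
--         for i in range(4, -1, -1):
--             nibble = (chunk >> (i * 4)) & 0xF
--             char = value_map.get(nibble, '')
--             result.append(char)
--
--     # Remove trailing unused characters
--     while result and result[-1] == '':
--         result.pop()
--
--     return ''.join(result)
-- ===== SOURCE B (Python) =====
-- def decode_numeric_message(data_chunks):
--     """
--     Decode numeric message from 20-bit chunks.
--
--     Args:
--         data_chunks: List of 20-bit values
--
--     Returns:
--         Decoded string
--     """
--     # Each chunk holds 5 nibbles; render them as 5 lowercase hex digits,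
--     # then translate a..e to the special characters and delete f.
--     table = str.maketrans('abcde', ' U-[]', 'f')
--     return ''.join('%05x' % (chunk & 0xFFFFF) for chunk in data_chunks).translate(table)
-- ===== Notes on version B (the rewrite author's own statement) =====
-- stated objective: idiomatic
-- what changed: Replaces the per-nibble shift/mask loop with dict lookups and the trailing-trim while loop by formatting each chunk as a fixed 5-digit hex string ('%05x' of the 20-bit value) and a single str.translate pass that maps a-e to the special characters and deletes f.
import Mathlib
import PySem

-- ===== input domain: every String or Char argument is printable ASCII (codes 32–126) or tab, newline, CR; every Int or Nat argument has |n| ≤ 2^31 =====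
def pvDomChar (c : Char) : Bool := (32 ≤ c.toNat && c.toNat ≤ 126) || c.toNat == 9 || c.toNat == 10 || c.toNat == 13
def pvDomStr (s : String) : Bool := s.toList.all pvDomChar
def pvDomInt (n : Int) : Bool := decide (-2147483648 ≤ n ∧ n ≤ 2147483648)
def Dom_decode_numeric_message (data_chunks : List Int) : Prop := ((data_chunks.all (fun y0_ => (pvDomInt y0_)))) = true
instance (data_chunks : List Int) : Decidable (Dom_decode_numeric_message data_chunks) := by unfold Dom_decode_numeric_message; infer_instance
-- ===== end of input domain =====

-- B replaces A's per-nibble dict-lookup loop and trailing-trim loop by fixed 5-digit hex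
-- formatting of each chunk plus a single character-translation pass (idiomatic; a timing run measured B faster by a constant factor).

-- ===== PORT A =====

-- the reverse map `value_map` of A (dict literal, insertion order)
def pvValueMap : PySem.Dict Int String :=
  ((((((((((((((((PySem.Dict.empty.insert 0x0 "0").insert 0x1 "1").insert 0x2 "2").insert
    0x3 "3").insert 0x4 "4").insert 0x5 "5").insert 0x6 "6").insert 0x7 "7").insert
    0x8 "8").insert 0x9 "9").insert 0xA " ").insert 0xB "U").insert 0xC "-").insert
    0xD "[").insert 0xE "]").insert 0xF "")

def decode_numeric_message (data_chunks : List Int) : String :=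
  -- for chunk in data_chunks: for i in range(4,-1,-1): result.append(value_map.get(nibble,''))
  let result : List String :=
    data_chunks.foldl (fun res chunk =>
      (PySem.List.pyRange 4 (-1) (-1)).foldl (fun res i =>
        -- (chunk >> (i*4)) & 0xF; i ∈ [0,4] so (i*4).toNat is exact
        let nibble := PySem.Int.band (chunk >>> (i * 4).toNat) 0xF
        let c := pvValueMap.getD nibble ""
        res ++ [c]) res) []
  -- while result and result[-1] == '': result.pop()
  let result := (result.reverse.dropWhile (fun s => s == "")).reverse
  PySem.Str.join "" result

-- ===== PORT B =====

-- one hex digit of '%x' (lowercase); exact for d < 16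
def pvHexDigit (d : Nat) : Char :=
  if d < 10 then Char.ofNat (48 + d) else Char.ofNat (87 + d)

-- '%05x' % (chunk & 0xFFFFF): exactly 5 lowercase hex digits, since 0 ≤ chunk & 0xFFFFF < 16^5
def pvHex5 (chunk : Int) : List Char :=
  let h := (PySem.Int.band chunk 0xFFFFF).toNat
  [pvHexDigit (h / 65536 % 16), pvHexDigit (h / 4096 % 16), pvHexDigit (h / 256 % 16),
   pvHexDigit (h / 16 % 16), pvHexDigit (h % 16)]

-- str.maketrans('abcde', ' U-[]', 'f'): none = deletion
def pvTranslate (c : Char) : Option Char :=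
  if c = 'a' then some ' ' else if c = 'b' then some 'U' else if c = 'c' then some '-'
  else if c = 'd' then some '[' else if c = 'e' then some ']'
  else if c = 'f' then none else some c

def decode_numeric_message_alt (data_chunks : List Int) : String :=
  String.ofList ((data_chunks.flatMap pvHex5).filterMap pvTranslate)

-- ===== PRECONDITION & SPEC =====

def Spec_decode_numeric_message (data_chunks : List Int) (out : String) : Prop :=
  out = decode_numeric_message_alt data_chunks
instance (data_chunks : List Int) (out : String) : Decidable (Spec_decode_numeric_message data_chunks out) := by
  unfold Spec_decode_numeric_message; infer_instance

-- ===== CLAIM =====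

def Claim_equal_decode_numeric_message : Prop :=
  ∀ (data_chunks : List Int), Dom_decode_numeric_message data_chunks →
    Spec_decode_numeric_message data_chunks (decode_numeric_message data_chunks)

-- ===== LEMMAS AND PROOFS =====

-- A's per-chunk contribution (the five strings its inner loop appends)
def pvChunkStrs (chunk : Int) : List String :=
  ([4, 3, 2, 1, 0] : List Int).map (fun i =>
    pvValueMap.getD (PySem.Int.band (chunk >>> (i * 4).toNat) 0xF) "")

theorem pv_band_15 (a : Int) : PySem.Int.band a 15 = a % 16 := by
  have h1 : ∀ m : Nat, m &&& 15 = m % 16 := fun m => by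
    have := Nat.and_two_pow_sub_one_eq_mod m 4; norm_num at this; exact this
  rw [PySem.Int.band]
  split_ifs with ha hb hb <;> first
    | (rw [show ((15:Int).toNat &&& (-a - 1).toNat) = ((-a - 1).toNat &&& 15) from Nat.and_comm .. , h1]; omega)
    | (rw [show (a.toNat &&& (15:Int).toNat) = (a.toNat &&& 15) from rfl, h1]; omega)
    | omega

theorem pv_band_mask (a : Int) : PySem.Int.band a 1048575 = a % 1048576 := by
  have h1 : ∀ m : Nat, m &&& 1048575 = m % 1048576 := fun m => by
    have := Nat.and_two_pow_sub_one_eq_mod m 20; norm_num at this; exact this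
  rw [PySem.Int.band]
  split_ifs with ha hb hb <;> first
    | (rw [show ((1048575:Int).toNat &&& (-a - 1).toNat) = ((-a - 1).toNat &&& 1048575) from Nat.and_comm .. , h1]; omega)
    | (rw [show (a.toNat &&& (1048575:Int).toNat) = (a.toNat &&& 1048575) from rfl, h1]; omega)
    | omega

-- A's result list before the trim is the concatenation of per-chunk contributions
theorem pv_A_result (chunks : List Int) (acc : List String) :
    chunks.foldl (fun res chunk =>
      (PySem.List.pyRange 4 (-1) (-1)).foldl (fun res i =>
        res ++ [pvValueMap.getD (PySem.Int.band (chunk >>> (i * 4).toNat) 0xF) ""]) res) acc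
    = acc ++ chunks.flatMap pvChunkStrs := by
  induction chunks generalizing acc with
  | nil => simp
  | cons c t ih =>
    rw [List.foldl_cons, ih, show PySem.List.pyRange 4 (-1) (-1) = [4,3,2,1,0] from by decide,
      PySem.List.foldl_append_singleton_eq_map]
    simp only [List.append_assoc, List.flatMap_cons, pvChunkStrs, Int.shiftRight_natCast_right]

-- ''.join with empty separator is concatenation of the characters
theorem pv_join_toList (l : List String) :
    (PySem.Str.join "" l).toList = l.flatMap String.toList := by
  rw [PySem.Str.toList_join]
  show List.intercalate [] _ = _
  simp [List.intercalate, List.flatMap]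
  induction l with
  | nil => rfl
  | cons a t ih => cases t <;> simp_all

-- trimming trailing strings that flatten to nothing does not change the flattened characters
theorem pv_trim_flatMap (l : List String) (h : ∀ s : String, (s == "") = true → s.toList = []) :
    ((l.reverse.dropWhile (fun s => s == "")).reverse).flatMap String.toList
      = l.flatMap String.toList := by
  have aux : ∀ m : List String,
      ((m.dropWhile (fun s => s == "")).reverse).flatMap String.toList
        = (m.reverse).flatMap String.toList := by
    intro m
    induction m with
    | nil => rfl
    | cons a t ih =>
      by_cases ha : (a == "") = true
      · simp only [List.dropWhile_cons, if_pos ha]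
        rw [ih]
        simp [h a ha]
      · simp [ha]
  have := aux l.reverse
  rwa [List.reverse_reverse] at this

theorem pv_filterMap_cons {α β : Type} (g : α → Option β) (a : α) (l : List α) :
    List.filterMap g (a :: l) = (g a).toList ++ List.filterMap g l := by
  cases hga : g a <;> simp [hga]

-- the per-nibble translation table agrees with A's dict
theorem pv_nibble_char (d : Nat) (hd : d < 16) :
    (pvValueMap.getD (↑d) "").toList = (pvTranslate (pvHexDigit d)).toList := by
  interval_cases d <;> decide

-- per chunk, A's five strings flatten to B's translated five hex digits
theorem pv_chunk_eq (c : Int) :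
    (pvChunkStrs c).flatMap String.toList = (pvHex5 c).filterMap pvTranslate := by
  have hm : (PySem.Int.band c 1048575).toNat = (c % 1048576).toNat := by
    rw [pv_band_mask]
  have e4 : PySem.Int.band (c >>> (16:Int)) 15
      = (((PySem.Int.band c 1048575).toNat / 65536 % 16 : Nat) : Int) := by
    rw [pv_band_15, show c >>> (16:Int) = c / 65536 from by rw [show (16:Int) = ((16:Nat):Int) from rfl, Int.shiftRight_natCast_right, Int.shiftRight_eq_div_pow]; norm_num, hm]; omega
  have e3 : PySem.Int.band (c >>> (12:Int)) 15
      = (((PySem.Int.band c 1048575).toNat / 4096 % 16 : Nat) : Int) := by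
    rw [pv_band_15, show c >>> (12:Int) = c / 4096 from by rw [show (12:Int) = ((12:Nat):Int) from rfl, Int.shiftRight_natCast_right, Int.shiftRight_eq_div_pow]; norm_num, hm]; omega
  have e2 : PySem.Int.band (c >>> (8:Int)) 15
      = (((PySem.Int.band c 1048575).toNat / 256 % 16 : Nat) : Int) := by
    rw [pv_band_15, show c >>> (8:Int) = c / 256 from by rw [show (8:Int) = ((8:Nat):Int) from rfl, Int.shiftRight_natCast_right, Int.shiftRight_eq_div_pow]; norm_num, hm]; omega
  have e1 : PySem.Int.band (c >>> (4:Int)) 15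
      = (((PySem.Int.band c 1048575).toNat / 16 % 16 : Nat) : Int) := by
    rw [pv_band_15, show c >>> (4:Int) = c / 16 from by rw [show (4:Int) = ((4:Nat):Int) from rfl, Int.shiftRight_natCast_right, Int.shiftRight_eq_div_pow]; norm_num, hm]; omega
  have e0 : PySem.Int.band (c >>> (0:Int)) 15
      = (((PySem.Int.band c 1048575).toNat % 16 : Nat) : Int) := by
    rw [pv_band_15, show c >>> (0:Int) = c / 1 from by rw [show (0:Int) = ((0:Nat):Int) from rfl, Int.shiftRight_natCast_right, Int.shiftRight_eq_div_pow]; norm_num, hm]; omega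
  have hlt : ∀ m : Nat, m % 16 < 16 := fun m => Nat.mod_lt _ (by norm_num)
  rw [pvChunkStrs, pvHex5]
  simp only [List.map_cons, List.map_nil, List.flatMap_cons, List.flatMap_nil,
    pv_filterMap_cons, List.filterMap_nil]
  norm_num
  rw [e4, e3, e2, e1, e0,
    pv_nibble_char _ (hlt _), pv_nibble_char _ (hlt _), pv_nibble_char _ (hlt _),
    pv_nibble_char _ (hlt _), pv_nibble_char _ (hlt _)]

-- ===== VERDICT =====

theorem decode_numeric_message_spec : Claim_equal_decode_numeric_message := by
  intro chunks _
  show decode_numeric_message chunks = decode_numeric_message_alt chunks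
  rw [decode_numeric_message, decode_numeric_message_alt]
  apply String.ext
  rw [String.toList_ofList, pv_join_toList,
    pv_trim_flatMap _ (fun s hs => by rw [eq_of_beq hs]; simp),
    pv_A_result, List.nil_append, List.flatMap_assoc, List.filterMap_flatMap]
  simp only [pv_chunk_eq]
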